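-- pv_equiv track=rewrite | github.com/chvjak/hr-practice | num_of_heaps.py | solve
-- ===== SOURCE A (Python) =====
-- from math import log2
--
-- def solve(A):
--     # sum of all permutations for each layer
--     # permutations(N) = N!
--
--     num_of_full_layers = int(log2(A + 1))
--     size_of_last_layer = A - (2 ** num_of_full_layers - 1)
--
--     res = 1
--     permutations_i = 1
--     # A = 3: i = {0, 1}
--     for i in range(num_of_full_layers):
--         if i != 0:
--             # A = 3: j = {}, {2}, {3, 4}, {5, 6, 7, 8}
--             for j in range(2 ** (i - 1) + 1, 2 ** i + 1):
--                 permutations_i *= j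
--                 permutations_i %= 1000000007
--
--         res *= permutations_i
--         res %= 1000000007
--
--     permutations_i = 1
--     for j in range(1, size_of_last_layer + 1):
--         permutations_i *= j
--         permutations_i %= 1000000007
--
--     res *= permutations_i
--     res %= 1000000007
--
--     return res
-- ===== SOURCE B (Python) =====
-- from math import log2
--
-- MOD = 1000000007
--
--
-- def _fact_mod(n):
--     """1*2*...*n reduced mod MOD inside the loop."""
--     r = 1
--     for j in range(2, n + 1):
--         r = r * j % MOD
--     return r
--
--
-- def solve(A):
--     num_of_full_layers = int(log2(A + 1))
--     size_of_last_layer = A - (2 ** num_of_full_layers - 1)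
--     res = 1
--     for i in range(num_of_full_layers):
--         res = res * _fact_mod(2 ** i) % MOD
--     return res * _fact_mod(size_of_last_layer) % MOD
-- ===== Notes on version B (the rewrite author's own statement) =====
-- stated objective: simpler
-- what changed: Replaces A's cross-layer incremental accumulators (permutations_i extended by the range 2^(i-1)+1..2^i each layer, carried between loops) by an independent from-scratch factorial-mod helper fact(n) called once per layer and once for the last layer.
import Mathlib
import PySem

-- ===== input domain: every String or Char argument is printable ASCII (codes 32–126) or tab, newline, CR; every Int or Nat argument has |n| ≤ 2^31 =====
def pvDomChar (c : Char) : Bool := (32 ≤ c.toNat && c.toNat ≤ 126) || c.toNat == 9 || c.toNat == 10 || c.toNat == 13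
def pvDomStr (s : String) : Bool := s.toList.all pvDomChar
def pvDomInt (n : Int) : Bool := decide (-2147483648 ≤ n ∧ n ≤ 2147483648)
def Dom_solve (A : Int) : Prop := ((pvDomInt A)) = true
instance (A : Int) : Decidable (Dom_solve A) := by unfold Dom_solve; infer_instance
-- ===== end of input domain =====

-- B replaces A's cross-layer incremental accumulator by an independent from-scratch
-- factorial-mod helper per layer (same cost; objective: simpler decomposition).

-- ===== PORT A =====
-- int(log2(A + 1)) is ported as Nat.log 2 (A+1).toNat: exact floor-log for
-- 1 ≤ A+1 ≤ 2^31 + 1 (Dom ∧ Pre_), where double rounding cannot cross an integer.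
-- Python's '% 1000000007' (positive divisor) is exactly Lean's Int '%' (emod).
def solve (A : Int) : Int :=
  let numFull : Nat := Nat.log 2 (A + 1).toNat
  let sizeLast : Int := A - (2 ^ numFull - 1)
  let st := (List.range numFull).foldl
    (fun (st : Int × Int) i =>
      let p := if i ≠ 0 then
          (PySem.List.pyRange ((2:Int) ^ (i - 1) + 1) ((2:Int) ^ i + 1) 1).foldl
            (fun p j => p * j % 1000000007) st.2
        else st.2
      (st.1 * p % 1000000007, p))
    (1, 1)
  let p2 := (PySem.List.pyRange 1 (sizeLast + 1) 1).foldl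
    (fun p j => p * j % 1000000007) 1
  st.1 * p2 % 1000000007

-- ===== PORT B =====
def pvFactMod (n : Int) : Int :=
  (PySem.List.pyRange 2 (n + 1) 1).foldl (fun r j => r * j % 1000000007) 1

def solve_alt (A : Int) : Int :=
  let numFull : Nat := Nat.log 2 (A + 1).toNat
  let sizeLast : Int := A - (2 ^ numFull - 1)
  let res := (List.range numFull).foldl
    (fun res i => res * pvFactMod ((2:Int) ^ i) % 1000000007) 1
  res * pvFactMod sizeLast % 1000000007

-- ===== PRECONDITION & SPEC =====
-- A raises ValueError (math domain error in log2) for A < 0; excluded.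
def Pre_solve (A : Int) : Prop := 0 ≤ A
instance (A : Int) : Decidable (Pre_solve A) := by unfold Pre_solve; infer_instance
def pvWitness_solve : Int := 7

def Spec_solve (A : Int) (out : Int) : Prop := out = solve_alt A
instance (A : Int) (out : Int) : Decidable (Spec_solve A out) := by unfold Spec_solve; infer_instance

-- ===== CLAIM (what is proved, stated in full; the proofs are below) =====
def Claim_equal_solve : Prop := ∀ (A : Int), Dom_solve A → Pre_solve A → Spec_solve A (solve A)

-- ===== LEMMAS AND PROOFS =====

-- extending the factorial-mod product from a to b (1 ≤ a ≤ b)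
lemma factMod_extend (a b : Int) (h1 : 1 ≤ a) (h2 : a ≤ b) :
    (PySem.List.pyRange (a + 1) (b + 1) 1).foldl
      (fun p j => p * j % 1000000007) (pvFactMod a) = pvFactMod b := by
  unfold pvFactMod
  rw [PySem.List.pyRange_one_append 2 (a + 1) (b + 1) (by omega) (by omega),
      List.foldl_append]

-- the last-layer loop of A (starting at 1) equals pvFactMod
lemma lastLayer_eq (n : Int) :
    (PySem.List.pyRange 1 (n + 1) 1).foldl (fun p j => p * j % 1000000007) 1
      = pvFactMod n := by
  unfold pvFactMod
  by_cases h : n ≤ 0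
  · rw [PySem.List.pyRange_one_eq_nil (by omega : (n:Int) + 1 ≤ 1),
        PySem.List.pyRange_one_eq_nil (by omega : (n:Int) + 1 ≤ 2)]
  · rw [PySem.List.pyRange_one_cons (by omega : (1:Int) < n + 1)]
    norm_num

lemma loop_eq (k : Nat) :
    (List.range k).foldl
      (fun (st : Int × Int) i =>
        let p := if i ≠ 0 then
            (PySem.List.pyRange ((2:Int) ^ (i - 1) + 1) ((2:Int) ^ i + 1) 1).foldl
              (fun p j => p * j % 1000000007) st.2
          else st.2
        (st.1 * p % 1000000007, p))
      (1, 1)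
    = ((List.range k).foldl
        (fun res i => res * pvFactMod ((2:Int) ^ i) % 1000000007) 1,
       match k with | 0 => 1 | m + 1 => pvFactMod ((2:Int) ^ m)) := by
  induction k with
  | zero => rfl
  | succ m ih =>
    rw [List.range_succ, List.foldl_append, List.foldl_append, ih]
    cases m with
    | zero =>
      simp only [List.foldl]
      have h1 : pvFactMod (1:Int) = 1 := by decide
      norm_num [h1]
    | succ t =>
      simp only [List.foldl]
      have hne : (t + 1 : Nat) ≠ 0 := by omega
      simp only [hne, if_true, Nat.add_sub_cancel, ne_eq, not_false_eq_true]
      rw [factMod_extend ((2:Int) ^ t) ((2:Int) ^ (t + 1))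
            (one_le_pow₀ (by norm_num)) (by rw [pow_succ]; nlinarith [pow_pos (by norm_num : (0:Int) < 2) t])]

-- ===== VERDICT (by name: the statement is the Claim_ definition above) =====
theorem solve_spec : Claim_equal_solve := by
  intro A _ _
  unfold Spec_solve solve solve_alt
  simp only [loop_eq, lastLayer_eq]
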